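-- pv_equiv track=rewrite | github.com/dolbz/advent-of-code | 2023/day13/part1.py | findReflectionIn
-- ===== SOURCE A (Python) =====
-- def verifyReflectionForPattern(pattern, reflection_start):
--     i = 0
--     while reflection_start - (i + 1) >= 0 and reflection_start + i < len(pattern):
--         if pattern[reflection_start - (i + 1)] != pattern[reflection_start + i]:
--             return False
--         i += 1
--     return True
--
-- def findReflectionIn(pattern):
--     previous_line = None
--     for i in range(len(pattern)):
--         line = pattern[i]
--         if line == previous_line:
--             if verifyReflectionForPattern(pattern, i):
--                 return i
--         previous_line = line
--     return None
-- ===== SOURCE B (Python) =====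
-- def findReflectionIn(pattern):
--     n = len(pattern)
--     rev = pattern[::-1]
--     for i in range(1, n):
--         if 2 * i <= n:
--             # axis touches the top: prefix of length 2i must be an even palindrome
--             if pattern[:2 * i] == rev[n - 2 * i:]:
--                 return i
--         else:
--             # axis touches the bottom: suffix of length 2(n-i) must be an even palindrome
--             if pattern[2 * i - n:] == rev[:2 * (n - i)]:
--                 return i
--     return None
-- ===== Notes on version B (the rewrite author's own statement) =====
-- stated objective: alternative
-- what changed: B reverses the pattern once and decides each candidate axis by a single slice equality between the pattern and its reversal (even palindromic prefix/suffix test), instead of A's adjacent-line prefilter plus a separate outward element-by-element verification loop.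
import Mathlib
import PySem

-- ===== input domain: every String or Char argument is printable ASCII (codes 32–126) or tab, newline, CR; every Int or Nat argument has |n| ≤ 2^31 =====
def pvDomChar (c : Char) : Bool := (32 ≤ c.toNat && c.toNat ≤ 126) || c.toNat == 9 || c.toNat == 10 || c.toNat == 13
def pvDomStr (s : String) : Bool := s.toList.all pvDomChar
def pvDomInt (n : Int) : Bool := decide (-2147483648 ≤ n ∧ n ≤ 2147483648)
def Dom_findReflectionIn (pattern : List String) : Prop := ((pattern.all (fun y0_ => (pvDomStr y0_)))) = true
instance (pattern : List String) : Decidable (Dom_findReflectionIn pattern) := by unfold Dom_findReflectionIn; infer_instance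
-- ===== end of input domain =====

-- B reverses the pattern once and decides each axis by ONE slice equality between the
-- pattern and that reversal (even palindromic prefix/suffix), replacing A's adjacent-line
-- prefilter + outward element-by-element verifier (alternative decomposition; same cost).

-- ===== PORT A =====
-- while reflection_start - (i+1) >= 0 and reflection_start + i < len(pattern): … (indices are
-- in range under the guard, so getD is exact; 'rs - (i+1) >= 0' over Python ints is 'i + 1 ≤ rs')
def verifyAux (pattern : List String) (rs i : Nat) : Bool :=
  if _h : i + 1 ≤ rs ∧ rs + i < pattern.length then
    if pattern.getD (rs - (i + 1)) "" ≠ pattern.getD (rs + i) "" then false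
    else verifyAux pattern rs (i + 1)
  else true
termination_by pattern.length - (rs + i)
decreasing_by all_goals omega

def findAux (pattern : List String) (prev : Option String) (i : Nat) : Option Int :=
  if _h : i < pattern.length then
    let line := pattern.getD i ""
    if some line = prev then
      if verifyAux pattern i 0 then some (i : Int)
      else findAux pattern (some line) (i + 1)
    else findAux pattern (some line) (i + 1)
  else none
termination_by pattern.length - i
decreasing_by all_goals omega

def findReflectionIn (pattern : List String) : Option Int :=
  findAux pattern none 0

-- ===== PORT B =====
-- Source B's per-axis test: the two slice comparisons (all slice bounds here are nonnegative and
-- ≤ n, so Python's pattern[:2*i], rev[n-2*i:], pattern[2*i-n:], rev[:2*(n-i)] are exactly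
-- List.take / List.drop); 'pattern[::-1]' is List.reverse
def winCond (pattern rev : List String) (n i : Nat) : Bool :=
  if 2 * i ≤ n then pattern.take (2 * i) == rev.drop (n - 2 * i)
  else pattern.drop (2 * i - n) == rev.take (2 * (n - i))

-- the loop 'for i in range(1, n)' of Source B
def altAux (pattern rev : List String) (n i : Nat) : Option Int :=
  if _h : i < n then
    if winCond pattern rev n i then some (i : Int)
    else altAux pattern rev n (i + 1)
  else none
termination_by n - i
decreasing_by all_goals omega

def findReflectionIn_alt (pattern : List String) : Option Int :=
  altAux pattern pattern.reverse pattern.length 1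

-- ===== PRECONDITION & SPEC =====
def Spec_findReflectionIn (pattern : List String) (out : Option Int) : Prop := out = findReflectionIn_alt pattern
instance (pattern : List String) (out : Option Int) : Decidable (Spec_findReflectionIn pattern out) := by unfold Spec_findReflectionIn; infer_instance

-- ===== CLAIM (what is proved, stated in full; the proofs are below) =====
def Claim_equal_findReflectionIn : Prop := ∀ (pattern : List String), Dom_findReflectionIn pattern → Spec_findReflectionIn pattern (findReflectionIn pattern)

-- ===== LEMMAS AND PROOFS =====

lemma verifyAux_true_iff (pattern : List String) (rs k : Nat) :
    verifyAux pattern rs k = true ↔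
      ∀ j, k ≤ j → j < min rs (pattern.length - rs) →
        pattern.getD (rs - 1 - j) "" = pattern.getD (rs + j) "" := by
  generalize hd : pattern.length - (rs + k) = d
  induction d generalizing k with
  | zero =>
    rw [verifyAux]
    have hg : ¬(k + 1 ≤ rs ∧ rs + k < pattern.length) := by omega
    simp only [dif_neg hg, true_iff]
    intro j hkj hjm; exfalso; omega
  | succ d ih =>
    rw [verifyAux]
    by_cases hg : k + 1 ≤ rs ∧ rs + k < pattern.length
    · simp only [dif_pos hg]
      by_cases heq : pattern.getD (rs - (k + 1)) "" = pattern.getD (rs + k) ""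
      · rw [if_neg (by simpa using heq), ih (k + 1) (by omega)]
        constructor
        · intro h j hkj hjm
          rcases Nat.eq_or_lt_of_le hkj with rfl | hlt
          · rw [show rs - 1 - k = rs - (k + 1) by omega]; exact heq
          · exact h j hlt hjm
        · intro h j hk1j hjm; exact h j (by omega) hjm
      · rw [if_pos (by simpa using heq)]
        simp only [Bool.false_eq_true, false_iff]
        intro h; apply heq
        have := h k le_rfl (by omega)
        rwa [show rs - 1 - k = rs - (k + 1) by omega] at this
    · simp only [dif_neg hg, true_iff]
      intro j hkj hjm; exfalso; omega

-- a list equals its reversal iff it is pointwise mirror-symmetric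
lemma pal_iff (w : List String) :
    (w = w.reverse) ↔ ∀ k, k < w.length → w.getD k "" = w.getD (w.length - 1 - k) "" := by
  constructor
  · intro h k hk
    have hr : w.reverse.getD k "" = w.getD (w.length - 1 - k) "" := by
      rw [List.getD_eq_getElem _ "" (by simpa using hk), List.getD_eq_getElem _ "" (by omega)]
      exact List.getElem_reverse (by simpa using hk)
    rw [← hr, ← h]
  · intro h
    apply List.ext_getElem (by simp)
    intro j h1 h2
    rw [List.getElem_reverse (by simpa using h2)]
    have := h j h1
    rwa [List.getD_eq_getElem w "" h1, List.getD_eq_getElem w "" (by omega)] at this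

-- a window of p centered between a+m-1 and a+m is palindromic iff p mirrors around that axis
lemma seg_pal_iff (p : List String) (a m : Nat) (h : a + 2 * m ≤ p.length) :
    ((p.drop a).take (2 * m) = ((p.drop a).take (2 * m)).reverse) ↔
      ∀ j, j < m → p.getD (a + m - 1 - j) "" = p.getD (a + m + j) "" := by
  have hlen : ((p.drop a).take (2 * m)).length = 2 * m := by simp; omega
  have hget : ∀ k, k < 2 * m → ((p.drop a).take (2 * m)).getD k "" = p.getD (a + k) "" := by
    intro k hk
    rw [List.getD_eq_getElem _ "" (by omega),
        List.getD_eq_getElem p "" (by omega)]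
    simp only [List.getElem_take, List.getElem_drop]
  rw [pal_iff, hlen]
  constructor
  · intro hp j hj
    have := hp (m - 1 - j) (by omega)
    rw [hget _ (by omega), hget _ (by omega)] at this
    rw [show a + (m - 1 - j) = a + m - 1 - j by omega,
        show 2 * m - 1 - (m - 1 - j) = m + j by omega] at this
    rwa [show a + (m + j) = a + m + j by omega] at this
  · intro hm k hk
    rw [hget _ hk, hget _ (by omega)]
    by_cases hkm : k < m
    · have := hm (m - 1 - k) (by omega)
      rw [show a + m - 1 - (m - 1 - k) = a + k by omega,
          show a + m + (m - 1 - k) = a + (2 * m - 1 - k) by omega] at this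
      exact this
    · have := hm (k - m) (by omega)
      rw [show a + m - 1 - (k - m) = a + (2 * m - 1 - k) by omega,
          show a + m + (k - m) = a + k by omega] at this
      exact this.symm

-- B's window condition says exactly "mirror axis at i"
lemma winCond_iff (p : List String) (i : Nat) (_h1 : 1 ≤ i) (h2 : i < p.length) :
    winCond p p.reverse p.length i = true ↔
      ∀ j, j < min i (p.length - i) → p.getD (i - 1 - j) "" = p.getD (i + j) "" := by
  unfold winCond
  by_cases hc : 2 * i ≤ p.length
  · rw [if_pos hc]
    have hm : min i (p.length - i) = i := by omega
    rw [hm, beq_iff_eq, ← List.reverse_take]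
    have hd0 : p.take (2 * i) = (p.drop 0).take (2 * i) := by simp
    rw [hd0]
    have := seg_pal_iff p 0 i (by omega)
    simp only [Nat.zero_add] at this
    rw [this]
  · rw [if_neg hc]
    have hm : min i (p.length - i) = p.length - i := by omega
    have h2e : 2 * (p.length - i) = p.length - (2 * i - p.length) := by omega
    rw [hm, beq_iff_eq, h2e, ← List.reverse_drop]
    have htk : p.drop (2 * i - p.length) = (p.drop (2 * i - p.length)).take (2 * (p.length - i)) := by
      rw [List.take_of_length_le]; simp; omega
    rw [htk]
    have := seg_pal_iff p (2 * i - p.length) (p.length - i) (by omega)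
    rw [show 2 * i - p.length + (p.length - i) = i by omega] at this
    rw [this]

lemma main_aux (pattern : List String) (i : Nat) (h1 : 1 ≤ i) :
    findAux pattern (some (pattern.getD (i - 1) "")) i =
      altAux pattern pattern.reverse pattern.length i := by
  generalize hd : pattern.length - i = d
  induction d generalizing i with
  | zero =>
    rw [findAux, altAux]
    have hi : ¬ i < pattern.length := by omega
    simp only [dif_neg hi]
  | succ d ih =>
    have hi : i < pattern.length := by omega
    rw [findAux, altAux]
    simp only [dif_pos hi]
    have hrec : findAux pattern (some (pattern.getD i "")) (i + 1) =
        altAux pattern pattern.reverse pattern.length (i + 1) := by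
      have := ih (i + 1) (by omega) (by omega)
      simpa using this
    by_cases hB : winCond pattern pattern.reverse pattern.length i = true
    · have hall := (winCond_iff pattern i h1 hi).mp hB
      have hadj : pattern.getD i "" = pattern.getD (i - 1) "" := by
        have := hall 0 (by omega)
        simpa using this.symm
      have hver : verifyAux pattern i 0 = true :=
        (verifyAux_true_iff pattern i 0).mpr (fun j _ hj => hall j hj)
      simp only [hadj, hver, hB, if_true]
    · by_cases hc1 : some (pattern.getD i "") = some (pattern.getD (i - 1) "")
      · have hver : verifyAux pattern i 0 = false := by
          cases h : verifyAux pattern i 0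
          · rfl
          · exfalso
            apply hB
            apply (winCond_iff pattern i h1 hi).mpr
            have hall := (verifyAux_true_iff pattern i 0).mp h
            intro j hj
            rcases Nat.eq_zero_or_pos j with rfl | hjpos
            · simp only [Nat.sub_zero, Nat.add_zero]
              exact (Option.some.inj hc1).symm
            · exact hall j (by omega) hj
        rw [if_pos hc1]
        simp only [hver, Bool.false_eq_true, if_false, if_neg hB]
        exact hrec
      · simp only [if_neg hc1, if_neg hB, hrec]

-- ===== VERDICT (by name: the statement is the Claim_ definition above) =====
theorem findReflectionIn_spec : Claim_equal_findReflectionIn := by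
  intro pattern _
  unfold Spec_findReflectionIn findReflectionIn findReflectionIn_alt
  rw [findAux]
  by_cases h0 : 0 < pattern.length
  · simp only [h0, dif_pos]
    have : (some (pattern.getD 0 "") = (none : Option String)) = False := by simp
    simp only [this, if_false]
    exact main_aux pattern 1 le_rfl
  · rw [altAux]
    simp only [dif_neg h0, dif_neg (by omega : ¬ 1 < pattern.length)]
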